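-- pv_equiv track=rewrite | github.com/MrBrantCode/unitest_baseline | mut_generate/mist_train_cf/cf_13994/solution.py | delete_every_third_character
-- ===== SOURCE A (Python) =====
-- def delete_every_third_character(s):
--     chars = list(s)
--     writeIndex = 0
--     readIndex = 0
--
--     while readIndex < len(chars):
--         if (readIndex + 1) % 3 != 0:
--             chars[writeIndex] = chars[readIndex]
--             writeIndex += 1
--         readIndex += 1
--
--     chars[writeIndex:] = []
--
--     return ''.join(chars)
-- ===== SOURCE B (Python) =====
-- def delete_every_third_character(s):
--     # Chunk the string into groups of three and keep the first two of each group.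
--     out = []
--     i = 0
--     while i < len(s):
--         out.append(s[i:i+2])
--         i += 3
--     return ''.join(out)
-- ===== Notes on version B (the rewrite author's own statement) =====
-- stated objective: faster
-- what changed: Instead of A's two-pointer in-place compaction over a char list (write/read indices, per-character modulo test, truncation, join), B strides over the string in three-character chunks and concatenates the two-character slice s[i:i+2] of each chunk, doing bulk slice copies instead of per-character Python-level work.
import Mathlib
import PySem

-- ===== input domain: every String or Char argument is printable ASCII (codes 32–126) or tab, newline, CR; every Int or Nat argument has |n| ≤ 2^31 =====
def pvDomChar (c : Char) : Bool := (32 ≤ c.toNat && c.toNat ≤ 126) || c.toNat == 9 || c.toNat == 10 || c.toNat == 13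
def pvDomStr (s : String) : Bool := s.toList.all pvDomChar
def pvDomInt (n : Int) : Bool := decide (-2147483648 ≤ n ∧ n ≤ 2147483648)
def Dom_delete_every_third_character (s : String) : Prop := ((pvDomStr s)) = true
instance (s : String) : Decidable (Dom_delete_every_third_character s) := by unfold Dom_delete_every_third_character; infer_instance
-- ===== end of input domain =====

-- B keeps the first two characters of every three-character chunk instead of A's
-- two-pointer in-place compaction; equal return value on all inputs (A does not mutate
-- anything a caller can see).

-- ===== PORT A =====
-- A's while loop: compact the char list in place with write/read indices, then truncate.
def pvLoopA (chars : List Char) (writeIndex readIndex : Nat) : List Char × Nat :=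
  if h : readIndex < chars.length then
    if (readIndex + 1) % 3 ≠ 0 then
      pvLoopA (chars.set writeIndex chars[readIndex]) (writeIndex + 1) (readIndex + 1)
    else
      pvLoopA chars writeIndex (readIndex + 1)
  else
    (chars, writeIndex)
termination_by chars.length - readIndex
decreasing_by
  · simp [List.length_set]; omega
  · omega

def delete_every_third_character (s : String) : String :=
  String.ofList ((pvLoopA s.toList 0 0).1.take (pvLoopA s.toList 0 0).2)
  -- chars[writeIndex:] = []; ''.join(chars)

-- ===== PORT B =====
-- B's while loop: collect s[i:i+2] for i = 0, 3, 6, …, then join.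
def pvLoopB (l : List Char) (i : Nat) : List (List Char) :=
  if i < l.length then
    PySem.List.slice l (some (i : Int)) (some ((i : Int) + 2)) :: pvLoopB l (i + 3)
  else
    []
termination_by l.length - i

def delete_every_third_character_alt (s : String) : String :=
  String.ofList (pvLoopB s.toList 0).flatten   -- ''.join(out)

-- ===== PRECONDITION & SPEC =====
def Spec_delete_every_third_character (s : String) (out : String) : Prop := out = delete_every_third_character_alt s
instance (s : String) (out : String) : Decidable (Spec_delete_every_third_character s out) := by unfold Spec_delete_every_third_character; infer_instance

-- ===== CLAIM (what is proved, stated in full; the proofs are below) =====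
def Claim_equal_delete_every_third_character : Prop := ∀ (s : String), Dom_delete_every_third_character s → Spec_delete_every_third_character s (delete_every_third_character s)

-- ===== LEMMAS AND PROOFS =====

-- Characterisation both ports are reduced to: keep a character at absolute index r
-- iff (r+1) % 3 ≠ 0.
def pvKeepFrom (r : Nat) : List Char → List Char
  | [] => []
  | a :: t => if (r + 1) % 3 ≠ 0 then a :: pvKeepFrom (r + 1) t else pvKeepFrom (r + 1) t

theorem pvKeepFrom_add_three (l : List Char) : ∀ r, pvKeepFrom (r + 3) l = pvKeepFrom r l := by
  induction l with
  | nil => intro r; rfl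
  | cons a t ih =>
    intro r
    have h3 : (r + 3 + 1) % 3 = (r + 1) % 3 := by omega
    simp only [pvKeepFrom]
    rw [h3, show r + 3 + 1 = r + 1 + 3 from by omega, ih (r + 1)]

theorem pvKeepFrom_three (l : List Char) : pvKeepFrom 3 l = pvKeepFrom 0 l :=
  pvKeepFrom_add_three l 0

theorem pvLoopA_eq (m : Nat) : ∀ (chars : List Char) (w r : Nat),
    chars.length - r ≤ m → w ≤ r →
    ((pvLoopA chars w r).1).take (pvLoopA chars w r).2
      = chars.take w ++ pvKeepFrom r (chars.drop r) := by
  induction m with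
  | zero =>
    intro chars w r hm _
    have hge : ¬ r < chars.length := by omega
    have hd0 : chars.drop r = [] := List.drop_eq_nil_of_le (by omega)
    rw [pvLoopA, dif_neg hge, hd0]
    simp [pvKeepFrom]
  | succ m ih =>
    intro chars w r hm hwr
    rw [pvLoopA]
    by_cases h : r < chars.length
    · have hw : w < chars.length := by omega
      have hdrop : chars.drop r = chars[r] :: chars.drop (r + 1) :=
        List.drop_eq_getElem_cons h
      have hlen : (chars.take w).length = w := by simp; omega
      have hset : chars.set w chars[r]
          = chars.take w ++ chars[r] :: chars.drop (w + 1) := by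
        rw [List.set_eq_take_append_cons_drop, if_pos hw]
      by_cases hc : (r + 1) % 3 ≠ 0
      · rw [dif_pos h, if_pos hc]
        rw [ih (chars.set w chars[r]) (w + 1) (r + 1)
              (by simp only [List.length_set]; omega) (by omega)]
        have htk : (chars.set w chars[r]).take (w + 1)
            = chars.take w ++ [chars[r]] := by
          rw [hset, show w + 1 = (chars.take w).length + 1 from by rw [hlen],
              List.take_append]
          simp
        have hdr : (chars.set w chars[r]).drop (r + 1)
            = chars.drop (r + 1) := by
          rw [hset, List.drop_append,
              List.drop_eq_nil_of_le (by simp; omega : (chars.take w).length ≤ r + 1),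
              List.nil_append,
              show r + 1 - (chars.take w).length = (r - w) + 1 from by rw [hlen]; omega,
              List.drop_succ_cons, List.drop_drop]
          congr 1
          omega
        rw [htk, hdr, hdrop]
        simp [pvKeepFrom, hc]
      · rw [dif_pos h, if_neg hc]
        rw [ih chars w (r + 1) (by omega) (by omega), hdrop]
        simp [pvKeepFrom, hc]
    · have hd0 : chars.drop r = [] := List.drop_eq_nil_of_le (by omega)
      rw [dif_neg h, hd0]
      simp [pvKeepFrom]

theorem pvLoopB_eq (m : Nat) : ∀ (l : List Char) (i : Nat),
    l.length - i ≤ m → (pvLoopB l i).flatten = pvKeepFrom 0 (l.drop i) := by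
  induction m with
  | zero =>
    intro l i hm
    have hge : ¬ i < l.length := by omega
    have hd0 : l.drop i = [] := List.drop_eq_nil_of_le (by omega)
    rw [pvLoopB, if_neg hge, hd0]
    rfl
  | succ m ih =>
    intro l i hm
    rw [pvLoopB]
    by_cases h : i < l.length
    · rw [if_pos h, List.flatten_cons, ih l (i + 3) (by omega)]
      have hslice : PySem.List.slice l (some (i : Int)) (some ((i : Int) + 2))
          = (l.drop i).take 2 := by
        rw [PySem.List.slice_toNat l (by omega) (by omega)]
        rw [show ((i : Int) + 2).toNat = i + 2 from by omega,
            show ((i : Int)).toNat = i from by omega]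
        congr 1
        omega
      have hd3 : l.drop (i + 3) = (l.drop i).drop 3 := by rw [List.drop_drop]
      rw [hslice, hd3]
      rcases hd : l.drop i with _ | ⟨a, _ | ⟨b, _ | ⟨c, t⟩⟩⟩
      · have := congrArg List.length hd
        simp at this
        omega
      · simp [pvKeepFrom]
      · simp [pvKeepFrom]
      · simp [pvKeepFrom, pvKeepFrom_three]
    · have hd0 : l.drop i = [] := List.drop_eq_nil_of_le (by omega)
      rw [if_neg h, hd0]
      rfl

-- ===== VERDICT (by name: the statement is the Claim_ definition above) =====
theorem delete_every_third_character_spec : Claim_equal_delete_every_third_character := by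
  intro s _
  unfold Spec_delete_every_third_character
  unfold delete_every_third_character delete_every_third_character_alt
  rw [pvLoopA_eq s.toList.length s.toList 0 0 (by omega) (Nat.le_refl 0),
      pvLoopB_eq s.toList.length s.toList 0 (by omega)]
  simp
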